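-- pv_equiv track=rewrite | github.com/malcolmcase97/mals-cit-patcher | cit_patcher.py | transform_name_to_vanilla
-- ===== SOURCE A (Python) =====
-- def transform_name_to_vanilla(filename_no_ext):
--     """
--     Rules:
--     - Split on underscores.
--     - Capitalize each head word and join with spaces.
--     - Detect first segment that contains a digit; everything from that segment
--       onward (including underscores) is preserved exactly and appended to the head
--       separated by a single underscore.
--     Examples:
--       crafting_table_0 -> "Crafting Table_0"
--       apple_0 -> "Apple_0"
--       birch_leaves_0_wall -> "Birch Leaves_0_wall"
--       dark_oak -> "Dark Oak"
--     """
--     parts = filename_no_ext.split('_')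
--     idx = None
--     for i, p in enumerate(parts):
--         if any(ch.isdigit() for ch in p):
--             idx = i
--             break
--     if idx is None:
--         # No numeric segment: capitalize and join with spaces
--         head = ' '.join(p.capitalize() for p in parts if p != '')
--         return head
--     else:
--         head_parts = parts[:idx]
--         tail_parts = parts[idx:]
--         head = ' '.join(p.capitalize() for p in head_parts if p != '')
--         tail = '_'.join(tail_parts)
--         return f"{head}_{tail}" if head else tail
-- ===== SOURCE B (Python) =====
-- def transform_name_to_vanilla(filename_no_ext):
--     # Char-scan: find the first digit in the raw string, then backtrack to the
--     # last underscore before it; head/tail come from string slices, not a segment list.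
--     j = next((i for i, ch in enumerate(filename_no_ext) if ch.isdigit()), None)
--     if j is None:
--         return ' '.join(p.capitalize() for p in filename_no_ext.split('_') if p)
--     b = filename_no_ext.rfind('_', 0, j)
--     if b == -1:
--         return filename_no_ext
--     head = ' '.join(p.capitalize() for p in filename_no_ext[:b].split('_') if p)
--     tail = filename_no_ext[b + 1:]
--     return f"{head}_{tail}" if head else tail
-- ===== Notes on version B (the rewrite author's own statement) =====
-- stated objective: alternative
-- what changed: B scans the raw string for the first digit character and backtracks to the last underscore before it, splitting the string by index slices, instead of A's splitting into a segment list first and scanning segments for a digit.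
import Mathlib
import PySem

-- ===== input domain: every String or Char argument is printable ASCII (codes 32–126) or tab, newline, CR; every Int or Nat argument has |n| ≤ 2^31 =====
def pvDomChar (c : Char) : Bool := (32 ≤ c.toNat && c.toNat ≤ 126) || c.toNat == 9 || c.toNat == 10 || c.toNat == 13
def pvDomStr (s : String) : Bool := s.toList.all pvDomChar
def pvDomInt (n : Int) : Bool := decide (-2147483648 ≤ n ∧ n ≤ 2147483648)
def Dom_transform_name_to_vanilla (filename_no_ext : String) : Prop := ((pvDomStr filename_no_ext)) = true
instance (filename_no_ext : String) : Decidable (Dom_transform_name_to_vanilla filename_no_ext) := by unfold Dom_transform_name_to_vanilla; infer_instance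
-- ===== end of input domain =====

-- B finds the first digit by a character scan and backtracks to the last underscore
-- before it, slicing the raw string by index, instead of A's segment-list scan
-- (objective: alternative decomposition, same cost).


-- Shared helper: `p.capitalize()` — first char upper-cased, rest lower-cased
-- (exact on the ASCII domain; both Pythons contain this very expression).
def pvCapitalize : List Char → List Char
  | [] => []
  | c :: rest => PySem.Chars.upperChar c :: rest.map PySem.Chars.lowerChar

-- Shared helper: `' '.join(p.capitalize() for p in parts if p)` (identical text in A and B).
def pvJoinCap (parts : List (List Char)) : List Char :=
  PySem.Chars.join [' '] ((parts.filter (fun p => p ≠ [])).map pvCapitalize)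

-- ===== PORT A =====
-- the `for i, p in enumerate(parts): if any(ch.isdigit() for ch in p): idx = i; break` loop
def pvA_findIdx : List (List Char) → Option Nat
  | [] => none
  | p :: rest =>
    if p.any PySem.Chars.isdigit then some 0
    else (pvA_findIdx rest).map (· + 1)

def pvA_core (cs : List Char) : List Char :=
  let parts := PySem.Chars.splitOn cs ['_']
  match pvA_findIdx parts with
  | none => pvJoinCap parts
  | some idx =>
    let head_parts := PySem.List.slice parts none (some (idx : Int))
    let tail_parts := PySem.List.slice parts (some (idx : Int)) none
    let head := pvJoinCap head_parts
    let tail := PySem.Chars.join ['_'] tail_parts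
    if head ≠ [] then head ++ ['_'] ++ tail else tail

def transform_name_to_vanilla (filename_no_ext : String) : String :=
  String.mk (pvA_core filename_no_ext.toList)

-- ===== PORT B =====
-- `next((i for i, ch in enumerate(s) if ch.isdigit()), None)`
def pvB_findDigit : List Char → Option Nat
  | [] => none
  | c :: rest =>
    if PySem.Chars.isdigit c then some 0
    else (pvB_findDigit rest).map (· + 1)

def pvB_core (cs : List Char) : List Char :=
  match pvB_findDigit cs with
  | none => pvJoinCap (PySem.Chars.splitOn cs ['_'])
  | some j =>
    let b := PySem.Chars.rfindFrom cs ['_'] 0 (some (j : Int))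
    if b = -1 then cs
    else
      let head := pvJoinCap (PySem.Chars.splitOn (PySem.List.slice cs none (some b)) ['_'])
      let tail := PySem.List.slice cs (some (b + 1)) none
      if head ≠ [] then head ++ ['_'] ++ tail else tail

def transform_name_to_vanilla_alt (filename_no_ext : String) : String :=
  String.mk (pvB_core filename_no_ext.toList)

-- ===== PRECONDITION & SPEC =====
def Spec_transform_name_to_vanilla (filename_no_ext : String) (out : String) : Prop := out = transform_name_to_vanilla_alt filename_no_ext
instance (filename_no_ext : String) (out : String) : Decidable (Spec_transform_name_to_vanilla filename_no_ext out) := by unfold Spec_transform_name_to_vanilla; infer_instance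

-- ===== CLAIM (what is proved, stated in full; the proofs are below) =====
def Claim_equal_transform_name_to_vanilla : Prop := ∀ (filename_no_ext : String), Dom_transform_name_to_vanilla filename_no_ext → Spec_transform_name_to_vanilla filename_no_ext (transform_name_to_vanilla filename_no_ext)


-- simple structural split on '_' (proof-side reference for PySem.Chars.splitOn)
def pvSplit : List Char → List (List Char)
  | [] => [[]]
  | c :: t =>
    if c = '_' then [] :: pvSplit t
    else match pvSplit t with
      | [] => [[c]]
      | h :: r => (c :: h) :: r

theorem pvSplit_ne_nil (cs : List Char) : pvSplit cs ≠ [] := by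
  cases cs with
  | nil => simp [pvSplit]
  | cons c t =>
    simp only [pvSplit]
    split <;> try simp
    split <;> simp

theorem pvSplitOn_go_eq (fuel : Nat) : ∀ (cs cur : List Char) (acc : List (List Char)),
    cs.length ≤ fuel →
    PySem.Chars.splitOn.go ['_'] fuel cs cur acc
      = acc.reverse ++ (pvSplit cs).modifyHead (cur.reverse ++ ·) := by
  induction fuel with
  | zero =>
    intro cs cur acc h
    have : cs = [] := by cases cs <;> simp_all
    subst this
    simp [PySem.Chars.splitOn.go, pvSplit]
  | succ f ih =>
    intro cs cur acc h
    cases cs with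
    | nil => simp [PySem.Chars.splitOn.go, pvSplit]
    | cons c rest =>
      simp only [PySem.Chars.splitOn.go]
      by_cases hc : c = '_'
      · subst hc
        rw [if_pos (by simp [List.isPrefixOf])]
        simp only [List.length_cons, List.length_nil, List.drop_succ_cons, List.drop_zero]
        rw [ih rest [] (cur.reverse :: acc) (by simpa using h)]
        simp only [pvSplit, List.reverse_cons, List.append_assoc, List.singleton_append]
        cases pvSplit rest <;> simp
      · rw [if_neg (by simp [List.isPrefixOf]; exact fun h' => hc (h' ▸ rfl))]
        rw [ih rest (c :: cur) acc (by simpa using h)]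
        simp only [pvSplit, if_neg hc]
        rcases h' : pvSplit rest with _ | ⟨hd, r⟩
        · exact absurd h' (pvSplit_ne_nil rest)
        · simp

theorem pvSplitOn_eq (cs : List Char) : PySem.Chars.splitOn cs ['_'] = pvSplit cs := by
  unfold PySem.Chars.splitOn
  rw [pvSplitOn_go_eq (cs.length + 1) cs [] [] (by omega)]
  rcases h' : pvSplit cs with _ | ⟨hd, r⟩
  · exact absurd h' (pvSplit_ne_nil cs)
  · simp

theorem pvSplit_no_sep {cs : List Char} (h : '_' ∉ cs) : pvSplit cs = [cs] := by
  induction cs with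
  | nil => rfl
  | cons c t ih =>
    simp only [List.mem_cons, not_or] at h
    have hc : ¬ c = '_' := fun e => h.1 e.symm
    simp [pvSplit, hc, ih h.2]

theorem pvSplit_append {h : List Char} (t : List Char) (hm : '_' ∉ h) :
    pvSplit (h ++ '_' :: t) = h :: pvSplit t := by
  induction h with
  | nil => simp [pvSplit]
  | cons c r ih =>
    simp only [List.mem_cons, not_or] at hm
    have hc : ¬ c = '_' := fun e => hm.1 e.symm
    simp [pvSplit, hc, ih hm.2]

theorem pvJoin_pvSplit (cs : List Char) : PySem.Chars.join ['_'] (pvSplit cs) = cs := by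
  induction cs with
  | nil => simp [pvSplit, PySem.Chars.join_singleton]
  | cons c t ih =>
    by_cases hc : c = '_'
    · subst hc
      rw [show pvSplit ('_' :: t) = [] :: pvSplit t by simp [pvSplit]]
      rcases h' : pvSplit t with _ | ⟨hd, r⟩
      · exact absurd h' (pvSplit_ne_nil t)
      · rw [PySem.Chars.join_cons_cons, ← h', ih]; simp
    · rcases h' : pvSplit t with _ | ⟨hd, r⟩
      · exact absurd h' (pvSplit_ne_nil t)
      · rw [show pvSplit (c :: t) = (c :: hd) :: r by simp [pvSplit, hc, h']]
        cases r with
        | nil => rw [PySem.Chars.join_singleton]; rw [h', PySem.Chars.join_singleton] at ih; simp [ih]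
        | cons q r' =>
          rw [PySem.Chars.join_cons_cons]
          rw [h', PySem.Chars.join_cons_cons] at ih
          simp [ih]

-- index of the last '_' (from the left), -1 if absent (reference for rfind)
def pvRLast : List Char → Int
  | [] => -1
  | c :: t => if '_' ∈ t then pvRLast t + 1 else if c = '_' then 0 else -1

theorem pvRLast_not_mem {cs : List Char} (h : '_' ∉ cs) : pvRLast cs = -1 := by
  cases cs with
  | nil => rfl
  | cons c t =>
    simp only [List.mem_cons, not_or] at h
    have hc : ¬ c = '_' := fun e => h.1 e.symm
    simp [pvRLast, h.2, hc]

theorem pvRLast_nonneg_of_mem {cs : List Char} (h : '_' ∈ cs) : 0 ≤ pvRLast cs := by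
  induction cs with
  | nil => simp at h
  | cons c t ih =>
    by_cases ht : '_' ∈ t
    · simp only [pvRLast, if_pos ht]
      have := ih ht; omega
    · have hc : c = '_' := by
        simp only [List.mem_cons] at h
        rcases h with h | h
        · exact h.symm
        · exact absurd h ht
      simp [pvRLast, ht, hc]

theorem pvRLast_snoc (xs : List Char) (c : Char) :
    pvRLast (xs ++ [c]) = if c = '_' then (xs.length : Int) else pvRLast xs := by
  induction xs with
  | nil => simp [pvRLast]
  | cons x t ih =>
    by_cases hc : c = '_'
    · subst hc
      simp only [List.cons_append, pvRLast, ih]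
      rw [if_pos (by simp)]
      simp
    · by_cases ht : '_' ∈ t
      · simp only [List.cons_append, pvRLast, ih, if_neg hc]
        rw [if_pos (by simp [ht]), if_pos ht]
      · simp only [List.cons_append, pvRLast, ih, if_neg hc]
        rw [if_neg (by simp only [List.mem_append, List.mem_singleton, not_or]; exact ⟨ht, fun e => hc e.symm⟩), if_neg ht]

theorem pvRLast_middle {h : List Char} (t : List Char) (hm : '_' ∉ h) :
    pvRLast (h ++ '_' :: t) =
      if '_' ∈ t then pvRLast t + (h.length + 1) else (h.length : Int) := by
  induction h with
  | nil => by_cases ht : '_' ∈ t <;> simp [pvRLast, ht]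
  | cons c r ih =>
    simp only [List.mem_cons, not_or] at hm
    have hc : ¬ c = '_' := fun e => hm.1 e.symm
    have hmem : '_' ∈ r ++ '_' :: t := by simp
    simp only [List.cons_append, pvRLast, if_pos hmem, ih hm.2]
    by_cases ht : '_' ∈ t
    · rw [if_pos ht, if_pos ht]; simp; ring
    · rw [if_neg ht, if_neg ht]; simp

theorem pvRfind_go_eq (s : List Char) : ∀ k, k ≤ s.length →
    PySem.Chars.rfind.go s ['_'] k = pvRLast (s.take (k + 1)) := by
  intro k
  induction k with
  | zero =>
    intro _
    simp only [PySem.Chars.rfind.go]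
    cases s with
    | nil => simp [pvRLast]
    | cons c t =>
      by_cases hc : c = '_'
      · rw [if_pos (by simp [List.isPrefixOf, hc])]
        simp [pvRLast, hc]
      · rw [if_neg (by simp [List.isPrefixOf]; exact fun e => hc (e ▸ rfl))]
        simp [pvRLast, hc]
  | succ k ih =>
    intro hk
    simp only [PySem.Chars.rfind.go]
    by_cases hlt : k + 1 < s.length
    · rw [List.take_succ (i := k + 1), List.drop_eq_getElem_cons hlt]
      by_cases hg : s[k+1] = '_'
      · rw [if_pos (by simp [List.isPrefixOf, hg])]
        have : s[k+1]?.toList = [s[k+1]] := by simp [List.getElem?_eq_getElem hlt]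
        rw [this, pvRLast_snoc, if_pos hg]
        simp [List.length_take, Nat.min_eq_left (by omega : k + 1 ≤ s.length)]
      · rw [if_neg (by simp [List.isPrefixOf]; exact fun e => hg (e ▸ rfl))]
        have : s[k+1]?.toList = [s[k+1]] := by simp [List.getElem?_eq_getElem hlt]
        rw [this, pvRLast_snoc, if_neg hg, ih (by omega)]
    · have hlen : s.length = k + 1 := by omega
      rw [if_neg (by simp [List.drop_eq_nil_of_le (by omega : s.length ≤ k + 1)])]
      rw [ih (by omega)]
      rw [List.take_of_length_le (by omega), List.take_of_length_le (by omega)]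

theorem pvRfind_eq (s : List Char) : PySem.Chars.rfind s ['_'] = pvRLast s := by
  unfold PySem.Chars.rfind
  rw [pvRfind_go_eq s s.length (le_refl _), List.take_of_length_le (by omega)]

theorem pvRfindFrom_eq (cs : List Char) (j : Nat) (hj : j ≤ cs.length) :
    PySem.Chars.rfindFrom cs ['_'] 0 (some (j : Int)) = pvRLast (cs.take j) := by
  have h1 : ¬((cs.length : Int) < (j : Int)) := by exact_mod_cast not_lt.2 hj
  have h2 : ¬((j : Int) < 0) := by omega
  unfold PySem.Chars.rfindFrom
  simp only [if_neg h1, if_neg h2, if_neg (show ¬((0 : Int) < 0) by omega),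
    Int.toNat_natCast, Int.toNat_zero, List.drop_zero]
  rw [pvRfind_eq]
  by_cases h : pvRLast (cs.take j) = -1
  · rw [if_pos h, h]
  · rw [if_neg h]; ring

theorem pvB_findDigit_append (h rest : List Char) :
    pvB_findDigit (h ++ rest) =
      match pvB_findDigit h with
      | some j => some j
      | none => (pvB_findDigit rest).map (h.length + ·) := by
  induction h with
  | nil => cases hr : pvB_findDigit rest <;> simp [pvB_findDigit, hr]
  | cons c t ih =>
    simp only [List.cons_append, pvB_findDigit]
    by_cases hc : PySem.Chars.isdigit c
    · simp [hc]
    · simp only [hc, Bool.false_eq_true, if_false, ih]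
      cases ht : pvB_findDigit t with
      | some j => simp
      | none =>
        cases hr : pvB_findDigit rest
        · simp
        · simp
          omega

theorem pvB_findDigit_lt {cs : List Char} {j : Nat} (h : pvB_findDigit cs = some j) :
    j < cs.length := by
  induction cs generalizing j with
  | nil => simp [pvB_findDigit] at h
  | cons c t ih =>
    simp only [pvB_findDigit] at h
    split at h
    · simp only [Option.some.injEq] at h
      simp; omega
    · cases ht : pvB_findDigit t with
      | none => rw [ht] at h; simp at h
      | some j' =>
        rw [ht] at h; simp at h
        have := ih ht
        simp; omega

theorem pvB_findDigit_none_iff (cs : List Char) :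
    pvB_findDigit cs = none ↔ ∀ c ∈ cs, PySem.Chars.isdigit c = false := by
  induction cs with
  | nil => simp [pvB_findDigit]
  | cons c t ih =>
    simp only [pvB_findDigit]
    by_cases hc : PySem.Chars.isdigit c
    · simp [hc]
    · simp only [if_neg hc, List.mem_cons]
      cases ht : pvB_findDigit t with
      | some j => simp [ht] at ih ⊢; exact fun _ => ih
      | none =>
        simp [ht] at ih ⊢
        exact ⟨by simpa using hc, ih⟩

theorem pvA_findIdx_none_iff (parts : List (List Char)) :
    pvA_findIdx parts = none ↔ ∀ p ∈ parts, p.any PySem.Chars.isdigit = false := by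
  induction parts with
  | nil => simp [pvA_findIdx]
  | cons p rest ih =>
    simp only [pvA_findIdx]
    by_cases hp : p.any PySem.Chars.isdigit
    · simp only [if_pos hp, List.mem_cons]
      simp only [List.any_eq_true] at hp
      rcases hp with ⟨x, hx, hd⟩
      simp only [List.any_eq_false]
      constructor
      · intro he; simp at he
      · intro hall
        have := hall p (Or.inl rfl) x hx
        simp [hd] at this
    · simp only [if_neg hp, List.mem_cons]
      cases hr : pvA_findIdx rest with
      | some j => simp [hr] at ih ⊢; exact fun _ => ih
      | none =>
        simp [hr] at ih ⊢
        exact ⟨by simpa using hp, ih⟩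

-- every char of a piece of pvSplit cs is a char of cs
theorem pvSplit_mem_mem (cs : List Char) : ∀ p ∈ pvSplit cs, ∀ c ∈ p, c ∈ cs := by
  induction cs with
  | nil =>
    intro p hp c hc
    simp [pvSplit] at hp; subst hp; simp at hc
  | cons a t ih =>
    by_cases ha : a = '_'
    · subst ha
      intro p hp c hc
      rw [show pvSplit ('_' :: t) = [] :: pvSplit t by simp [pvSplit]] at hp
      simp only [List.mem_cons] at hp
      rcases hp with rfl | hp
      · simp at hc
      · exact List.mem_cons_of_mem _ (ih p hp c hc)
    · rcases h' : pvSplit t with _ | ⟨hd, r⟩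
      · exact absurd h' (pvSplit_ne_nil t)
      · intro p hp c hc
        rw [show pvSplit (a :: t) = (a :: hd) :: r by simp [pvSplit, ha, h']] at hp
        simp only [List.mem_cons] at hp
        rcases hp with rfl | hp
        · simp only [List.mem_cons] at hc
          rcases hc with rfl | hc
          · simp
          · exact List.mem_cons_of_mem _ (ih hd (h' ▸ List.mem_cons_self) c hc)
        · exact List.mem_cons_of_mem _ (ih p (h' ▸ List.mem_cons_of_mem _ hp) c hc)

theorem pvSplit_digitfree {cs : List Char} (h : pvB_findDigit cs = none) :
    ∀ p ∈ pvSplit cs, p.any PySem.Chars.isdigit = false := by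
  rw [pvB_findDigit_none_iff] at h
  intro p hp
  simp only [List.any_eq_false]
  intro c hc
  simpa using h c (pvSplit_mem_mem cs p hp c hc)

-- if pvB_findDigit finds j, then position j holds a digit
theorem pvB_digit_at {cs : List Char} {j : Nat} (h : pvB_findDigit cs = some j) :
    ∃ hlt : j < cs.length, PySem.Chars.isdigit cs[j] = true := by
  induction cs generalizing j with
  | nil => simp [pvB_findDigit] at h
  | cons c t ih =>
    simp only [pvB_findDigit] at h
    split at h
    · simp only [Option.some.injEq] at h
      subst h
      exact ⟨by simp, by simpa using (by assumption)⟩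
    · cases ht : pvB_findDigit t with
      | none => rw [ht] at h; simp at h
      | some j' =>
        rw [ht] at h
        simp only [Option.map_some, Option.some.injEq] at h
        subst h
        rcases ih ht with ⟨hlt, hd⟩
        exact ⟨by simpa using Nat.succ_lt_succ hlt, by simpa using hd⟩

-- first-'_' decomposition of a list containing '_'
theorem pvSep_decomp {cs : List Char} (h : '_' ∈ cs) :
    ∃ hd t, cs = hd ++ '_' :: t ∧ '_' ∉ hd := by
  induction cs with
  | nil => simp at h
  | cons a r ih =>
    by_cases ha : a = '_'
    · exact ⟨[], r, by simp [ha], by simp⟩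
    · have hr : '_' ∈ r := by
        simp only [List.mem_cons] at h
        rcases h with h | h
        · exact absurd h.symm ha
        · exact h
      rcases ih hr with ⟨hd, t, heq, hnm⟩
      exact ⟨a :: hd, t, by simp [heq], by
        simp only [List.mem_cons, not_or]
        exact ⟨fun e => ha e.symm, hnm⟩⟩

-- KEY LEMMA: in the digit case, B's boundary search matches A's segment index
theorem pvKey : ∀ (n : Nat) (cs : List Char), cs.length ≤ n → ∀ j, pvB_findDigit cs = some j →
    ∃ idx, pvA_findIdx (pvSplit cs) = some idx ∧
      ((pvRLast (cs.take j) = -1 ∧ idx = 0) ∨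
       (∃ b : Nat, pvRLast (cs.take j) = (b : Int) ∧ 0 < idx ∧
          pvSplit (cs.take b) = (pvSplit cs).take idx ∧
          cs.drop (b + 1) = PySem.Chars.join ['_'] ((pvSplit cs).drop idx))) := by
  intro n
  induction n with
  | zero =>
    intro cs hlen j hj
    have : cs = [] := by cases cs <;> simp_all
    subst this
    simp [pvB_findDigit] at hj
  | succ n ih =>
    intro cs hlen j hj
    by_cases hsep : '_' ∈ cs
    · rcases pvSep_decomp hsep with ⟨hd, t, rfl, hnm⟩
      rw [pvSplit_append t hnm]
      cases hhd : pvB_findDigit hd with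
      | some j0 =>
        -- first digit is inside the first segment
        have hj0 : j = j0 := by
          rw [pvB_findDigit_append, hhd] at hj
          simpa using hj.symm
        subst hj0
        have hj0lt : j < hd.length := pvB_findDigit_lt hhd
        refine ⟨0, ?_, Or.inl ⟨?_, rfl⟩⟩
        · have : hd.any PySem.Chars.isdigit = true := by
            have := pvB_findDigit_lt hhd
            simp only [List.any_eq_true]
            -- hd[j] is a digit
            rcases pvB_digit_at hhd with ⟨hlt, hdig⟩
            exact ⟨hd[j], List.getElem_mem hlt, hdig⟩
          simp [pvA_findIdx, this]
        · rw [List.take_append_of_le_length (by omega)]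
          exact pvRLast_not_mem fun hm => hnm (List.take_subset _ _ hm)
      | none =>
        -- first digit is after the separator
        rw [pvB_findDigit_append, hhd] at hj
        simp only [pvB_findDigit, show PySem.Chars.isdigit '_' = false by decide,
          Bool.false_eq_true, if_false] at hj
        cases hjt : pvB_findDigit t with
        | none => rw [hjt] at hj; simp at hj
        | some j' =>
          rw [hjt] at hj
          simp only [Option.map_some, Option.some.injEq] at hj
          have hj' : j = hd.length + (j' + 1) := hj.symm
          subst hj'
          have htn : t.length ≤ n := by
            simp only [List.length_append, List.length_cons] at hlen; omega
          obtain ⟨idx', hA', hcase⟩ := ih t htn j' hjt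
          have hdany : hd.any PySem.Chars.isdigit = false := by
            simp only [List.any_eq_false]
            intro x hx
            simpa using (pvB_findDigit_none_iff hd).mp hhd x hx
          refine ⟨idx' + 1, ?_, Or.inr ?_⟩
          · simp only [pvA_findIdx, hdany, Bool.false_eq_true, if_false, hA', Option.map_some]
          · have htake : (hd ++ '_' :: t).take (hd.length + (j' + 1)) = hd ++ '_' :: t.take j' := by
              rw [List.take_append]
              congr 1
              · exact List.take_of_length_le (by omega)
              · simp
            rw [htake, pvRLast_middle _ hnm]
            rcases hcase with ⟨hneg, hidx0⟩ | ⟨b', hb', hpos, hsp, hdr⟩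
            · -- no '_' before the digit inside t: boundary is the separator after hd
              subst hidx0
              have hnm' : '_' ∉ t.take j' := by
                intro hm
                have := pvRLast_nonneg_of_mem hm
                omega
              refine ⟨hd.length, by rw [if_neg hnm'], by omega, ?_, ?_⟩
              · rw [List.take_append_of_le_length (le_refl _), List.take_length,
                  pvSplit_no_sep hnm]
                simp
              · rw [show hd.length + 1 = (hd ++ ['_']).length by simp,
                  show hd ++ '_' :: t = (hd ++ ['_']) ++ t by simp, List.drop_left]
                simp [pvJoin_pvSplit t]
            · -- boundary lies inside t
              have hmem' : '_' ∈ t.take j' := by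
                by_contra hnm'
                rw [pvRLast_not_mem hnm'] at hb'
                omega
              refine ⟨hd.length + 1 + b', by rw [if_pos hmem', hb']; push_cast; ring,
                by omega, ?_, ?_⟩
              · have ht2 : (hd ++ '_' :: t).take (hd.length + 1 + b') = hd ++ '_' :: t.take b' := by
                  rw [List.take_append]
                  congr 1
                  · exact List.take_of_length_le (by omega)
                  · rw [show hd.length + 1 + b' - hd.length = b' + 1 by omega,
                      List.take_succ_cons]
                rw [ht2, pvSplit_append _ hnm, hsp]
                simp
              · have ht3 : hd.length + 1 + b' + 1 = (hd ++ ['_']).length + (b' + 1) := by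
                  simp; omega
                rw [ht3, show hd ++ '_' :: t = (hd ++ ['_']) ++ t by simp,
                  List.drop_length_add_append, hdr]
                simp
    · -- no separator: single segment, digit inside it
      have hsplit : pvSplit cs = [cs] := pvSplit_no_sep hsep
      rw [hsplit]
      have hdig : cs.any PySem.Chars.isdigit = true := by
        rcases pvB_digit_at hj with ⟨hlt, hdigit⟩
        simp only [List.any_eq_true]
        exact ⟨cs[j], List.getElem_mem hlt, hdigit⟩
      refine ⟨0, by simp [pvA_findIdx, hdig], Or.inl ⟨?_, rfl⟩⟩
      exact pvRLast_not_mem fun hm => hsep (List.take_subset _ _ hm)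

theorem pvCore_eq (cs : List Char) : pvA_core cs = pvB_core cs := by
  unfold pvA_core pvB_core
  rw [pvSplitOn_eq]
  cases hB : pvB_findDigit cs with
  | none =>
    have hA : pvA_findIdx (pvSplit cs) = none :=
      (pvA_findIdx_none_iff _).mpr (pvSplit_digitfree hB)
    simp only [hA]
  | some j =>
    have hjlt := pvB_findDigit_lt hB
    obtain ⟨idx, hA, hcase⟩ := pvKey cs.length cs (le_refl _) j hB
    simp only [hA, pvRfindFrom_eq cs j (le_of_lt hjlt)]
    rcases hcase with ⟨hneg, rfl⟩ | ⟨b, hb, hpos, hsp, hdr⟩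
    · simp only [if_pos hneg]
      simp only [PySem.List.slice_to _ (by positivity : (0:Int) ≤ ((0:Nat):Int)),
        PySem.List.slice_from _ (by positivity : (0:Int) ≤ ((0:Nat):Int))]
      simp [pvJoinCap, pvJoin_pvSplit]
    · simp only [if_neg (show ¬(pvRLast (cs.take j) = -1) by rw [hb]; omega)]
      simp only [PySem.List.slice_to _ (by positivity : (0:Int) ≤ ((idx:Nat):Int)),
        PySem.List.slice_from _ (by positivity : (0:Int) ≤ ((idx:Nat):Int)), hb,
        PySem.List.slice_to _ (by positivity : (0:Int) ≤ ((b:Nat):Int)),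
        show ((b : Int) + 1) = (((b + 1 : Nat)) : Int) by push_cast; ring,
        PySem.List.slice_from _ (by positivity : (0:Int) ≤ (((b+1):Nat):Int)),
        Int.toNat_natCast, pvSplitOn_eq]
      rw [hsp, hdr]

-- ===== VERDICT (by name: the statement is the Claim_ definition above) =====
theorem transform_name_to_vanilla_spec : Claim_equal_transform_name_to_vanilla := by
  intro s _
  unfold Spec_transform_name_to_vanilla transform_name_to_vanilla transform_name_to_vanilla_alt
  exact congrArg String.mk (pvCore_eq s.toList)
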